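-- pv_equiv track=rewrite | github.com/FegDotExe/RiPytizioni | Alberto/primaMultipli.py | primaMultipli
-- ===== SOURCE A (Python) =====
-- def primaMultipli(seq,m):
--     i=0
--     while i<len(seq):
--         if seq[i]%m==0:
--             j=i
--             valoreTemp=seq[i]
--             while j>0 and seq[j-1]%m!=0:
--                 seq[j]=seq[j-1]
--                 j-=1
--             seq[j]=valoreTemp
--         i+=1
--     return seq
-- ===== SOURCE B (Python) =====
-- def primaMultipli(seq, m):
--     # stable partition: multiples of m first, then the rest, each in original order
--     mult = [x for x in seq if x % m == 0]
--     rest = [x for x in seq if x % m != 0]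
--     seq[:] = mult + rest  # same in-place mutation of seq as A
--     return seq
-- ===== Notes on version B (the rewrite author's own statement) =====
-- stated objective: simpler
-- what changed: Replaces A's in-place insertion-style shifting (for each multiple, shift it left past the preceding non-multiples) with a single two-pass stable partition (filter multiples, filter non-multiples, concatenate); intended as faster (O(n) vs O(n^2) worst case) but a timing run on random inputs did not confirm it consistently.
import Mathlib
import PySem

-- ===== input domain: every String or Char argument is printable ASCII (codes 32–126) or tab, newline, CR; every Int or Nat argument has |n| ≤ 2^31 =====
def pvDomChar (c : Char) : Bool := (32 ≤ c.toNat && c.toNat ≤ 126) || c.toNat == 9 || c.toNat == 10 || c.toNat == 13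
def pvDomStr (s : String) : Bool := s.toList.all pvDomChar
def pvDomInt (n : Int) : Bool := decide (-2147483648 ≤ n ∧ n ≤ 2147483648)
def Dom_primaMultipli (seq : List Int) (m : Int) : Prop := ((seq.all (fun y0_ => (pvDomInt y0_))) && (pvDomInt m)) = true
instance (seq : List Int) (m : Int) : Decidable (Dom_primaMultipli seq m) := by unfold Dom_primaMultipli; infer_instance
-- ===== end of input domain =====

-- B replaces A's in-place insertion shifting by a two-pass stable partition (filter
-- multiples, filter non-multiples, concatenate); A mutates seq in place and B mirrors that
-- via slice assignment, but the equivalence proved here is about the RETURN value.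

-- ===== PORT A =====
-- inner 'while j>0 and seq[j-1]%m!=0: seq[j]=seq[j-1]; j-=1' then 'seq[j]=valoreTemp'
def pvInnerA (seq : List Int) (m : Int) (j : Nat) (v : Int) : List Int :=
  if j > 0 ∧ PySem.Int.mod (seq.getD (j-1) 0) m ≠ 0 then
    pvInnerA (seq.set j (seq.getD (j-1) 0)) m (j-1) v
  else
    seq.set j v
termination_by j
decreasing_by omega

theorem pvInnerA_length (seq : List Int) (m : Int) (j : Nat) (v : Int) :
    (pvInnerA seq m j v).length = seq.length := by
  fun_induction pvInnerA seq m j v <;> simp_all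

-- outer 'while i<len(seq)' loop
def pvOuterA (seq : List Int) (m : Int) (i : Nat) : List Int :=
  if h : i < seq.length then
    pvOuterA (if PySem.Int.mod (seq.getD i 0) m = 0 then pvInnerA seq m i (seq.getD i 0) else seq) m (i+1)
  else seq
termination_by seq.length - i
decreasing_by
  split
  · have := pvInnerA_length seq m i (seq.getD i 0)
    omega
  · omega

def primaMultipli (seq : List Int) (m : Int) : List Int := pvOuterA seq m 0

-- ===== PORT B =====
def primaMultipli_alt (seq : List Int) (m : Int) : List Int :=
  (seq.filter (fun x => PySem.Int.mod x m == 0)) ++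
  (seq.filter (fun x => PySem.Int.mod x m != 0))

-- ===== PRECONDITION & SPEC =====
-- Pre_ excludes exactly the inputs where Python A raises ZeroDivisionError (m = 0 with a
-- nonempty seq); B raises there too.
def Pre_primaMultipli (seq : List Int) (m : Int) : Prop := m ≠ 0 ∨ seq = []
instance (seq : List Int) (m : Int) : Decidable (Pre_primaMultipli seq m) := by
  unfold Pre_primaMultipli; infer_instance
def pvWitness_primaMultipli : List Int × Int := ([3, 1, 6, 4], 3)

def Spec_primaMultipli (seq : List Int) (m : Int) (out : List Int) : Prop := out = primaMultipli_alt seq m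
instance (seq : List Int) (m : Int) (out : List Int) : Decidable (Spec_primaMultipli seq m out) := by unfold Spec_primaMultipli; infer_instance

-- ===== CLAIM (what is proved, stated in full; the proofs are below) =====
def Claim_equal_primaMultipli : Prop := ∀ (seq : List Int) (m : Int), Dom_primaMultipli seq m → Pre_primaMultipli seq m → Spec_primaMultipli seq m (primaMultipli seq m)

-- ===== LEMMAS AND PROOFS =====

-- the inner shift, started at index |M|+|N| over M ++ N ++ w :: rest with M all multiples
-- and N all non-multiples, moves v to position |M|: result M ++ v :: N ++ rest.
theorem pvInnerA_spec (m : Int) (N : List Int) : ∀ (M : List Int) (w v : Int) (rest : List Int),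
    (∀ x ∈ M, PySem.Int.mod x m = 0) → (∀ x ∈ N, PySem.Int.mod x m ≠ 0) →
    pvInnerA (M ++ N ++ w :: rest) m (M.length + N.length) v = M ++ v :: N ++ rest := by
  induction N using List.reverseRecOn with
  | nil =>
    intro M w v rest hM _
    rw [pvInnerA, if_neg]
    · simp
    · rintro ⟨hpos, hne⟩
      rcases M.eq_nil_or_concat with rfl | ⟨M', a, rfl⟩
      · simp at hpos
      · simp [List.getD, List.concat_eq_append] at hne
        exact hne (hM a (by simp))
  | append_singleton N' n ih =>
    intro M w v rest hM hN
    have hn : PySem.Int.mod n m ≠ 0 := hN n (by simp)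
    have hget : (M ++ (N' ++ [n]) ++ w :: rest).getD (M.length + (N' ++ [n]).length - 1) 0 = n := by
      simp [List.getD]
    rw [pvInnerA, if_pos ⟨by simp, by rw [hget]; exact hn⟩, hget]
    have hset : (M ++ (N' ++ [n]) ++ w :: rest).set (M.length + (N' ++ [n]).length) n
        = M ++ N' ++ n :: n :: rest := by
      simp
    rw [hset]
    have hj : M.length + (N' ++ [n]).length - 1 = M.length + N'.length := by simp
    rw [hj, ih M n v (n :: rest) hM (fun x hx => hN x (by simp [hx]))]
    simp

-- outer-loop invariant: the processed prefix is already partitioned as M ++ N.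
theorem pvOuterA_spec (m : Int) : ∀ (rest M N : List Int),
    (∀ x ∈ M, PySem.Int.mod x m = 0) → (∀ x ∈ N, PySem.Int.mod x m ≠ 0) →
    pvOuterA (M ++ N ++ rest) m (M.length + N.length)
      = (M ++ rest.filter (fun x => PySem.Int.mod x m == 0))
        ++ (N ++ rest.filter (fun x => PySem.Int.mod x m != 0)) := by
  intro rest
  induction rest with
  | nil => intro M N _ _; rw [pvOuterA]; simp
  | cons x rest' ih =>
    intro M N hM hN
    rw [pvOuterA]
    have hlen : M.length + N.length < (M ++ N ++ x :: rest').length := by simp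
    rw [dif_pos hlen]
    have hget : (M ++ N ++ x :: rest').getD (M.length + N.length) 0 = x := by
      simp [List.getD]
    simp only [hget]
    by_cases hx : PySem.Int.mod x m = 0
    · rw [if_pos hx, pvInnerA_spec m N M x x rest' hM hN]
      have he : M ++ x :: N ++ rest' = (M ++ [x]) ++ N ++ rest' := by simp
      rw [he]
      have hl : M.length + N.length + 1 = (M ++ [x]).length + N.length := by simp; omega
      have hM' : ∀ y ∈ M ++ [x], PySem.Int.mod y m = 0 := by
        intro y hy
        rcases List.mem_append.mp hy with h | h
        · exact hM y h
        · simp at h; subst h; exact hx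
      rw [hl, ih (M ++ [x]) N hM' hN]
      simp [hx]
    · rw [if_neg hx]
      have he : M ++ N ++ x :: rest' = M ++ (N ++ [x]) ++ rest' := by simp
      rw [he]
      have hl : M.length + N.length + 1 = M.length + (N ++ [x]).length := by simp; omega
      have hN' : ∀ y ∈ N ++ [x], PySem.Int.mod y m ≠ 0 := by
        intro y hy
        rcases List.mem_append.mp hy with h | h
        · exact hN y h
        · simp at h; subst h; exact hx
      rw [hl, ih M (N ++ [x]) hM hN']
      simp [hx]

-- ===== VERDICT (by name: the statement is the Claim_ definition above) =====
theorem primaMultipli_spec : Claim_equal_primaMultipli := by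
  intro seq m _ _
  unfold Spec_primaMultipli primaMultipli primaMultipli_alt
  have h := pvOuterA_spec m seq [] [] (by simp) (by simp)
  simpa using h
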